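-- pv_equiv track=rewrite | github.com/MaksimFomin06/mshp3 | новогодний марафон/third_day/quest.py | calculate_energy_and_cities
-- ===== SOURCE A (Python) =====
-- def calculate_energy_and_cities(names):
--     total_energy = 0
--     even_cities = 0
--     odd_cities = 0
--
--     for city_name in names:
--         length = len(city_name)
--         if length % 2 == 0:
--             energy_cost = length * 2
--             even_cities += 1
--         else:
--             energy_cost = length * 3
--             odd_cities += 1
--
--         total_energy += energy_cost
--
--     return total_energy, even_cities, odd_cities
-- ===== SOURCE B (Python) =====
-- def calculate_energy_and_cities(names):
--     lengths = [len(name) for name in names]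
--     evens = [l for l in lengths if l % 2 == 0]
--     odds = [l for l in lengths if l % 2 != 0]
--     return 2 * sum(evens) + 3 * sum(odds), len(evens), len(odds)
-- ===== Notes on version B (the rewrite author's own statement) =====
-- stated objective: alternative
-- what changed: Replaces the single fused branching accumulation loop with separate passes: map names to lengths, partition lengths by parity, then compute the energy as 2*sum(evens)+3*sum(odds) and the counts as the partition sizes.
import Mathlib
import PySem

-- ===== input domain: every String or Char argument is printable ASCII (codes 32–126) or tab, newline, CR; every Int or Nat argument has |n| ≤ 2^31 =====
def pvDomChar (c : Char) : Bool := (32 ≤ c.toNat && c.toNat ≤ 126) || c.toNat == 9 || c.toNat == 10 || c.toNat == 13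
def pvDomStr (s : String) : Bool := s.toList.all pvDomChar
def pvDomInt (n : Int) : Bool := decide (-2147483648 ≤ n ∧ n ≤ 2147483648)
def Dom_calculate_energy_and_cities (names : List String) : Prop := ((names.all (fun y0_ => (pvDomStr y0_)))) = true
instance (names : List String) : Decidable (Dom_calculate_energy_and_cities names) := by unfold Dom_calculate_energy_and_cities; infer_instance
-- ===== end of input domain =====

-- ===== PORT A =====
-- B replaces A's single fused branching loop with separate passes (lengths → parity partition → sums/counts); objective: alternative decomposition, same cost.
def calculate_energy_and_cities (names : List String) : Int × Int × Int :=
  names.foldl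
    (fun st city_name =>
      let (total_energy, even_cities, odd_cities) := st
      let length : Int := PySem.Str.len city_name
      if length % 2 == 0 then
        (total_energy + length * 2, even_cities + 1, odd_cities)
      else
        (total_energy + length * 3, even_cities, odd_cities + 1))
    (0, 0, 0)

-- ===== PORT B =====
def calculate_energy_and_cities_alt (names : List String) : Int × Int × Int :=
  let lengths : List Int := names.map (fun name => PySem.Str.len name)
  let evens : List Int := lengths.filter (fun l => l % 2 == 0)
  let odds : List Int := lengths.filter (fun l => l % 2 != 0)
  (2 * evens.sum + 3 * odds.sum, (evens.length : Int), (odds.length : Int))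

-- ===== PRECONDITION & SPEC =====
def Spec_calculate_energy_and_cities (names : List String) (out : Int × Int × Int) : Prop := out = calculate_energy_and_cities_alt names
instance (names : List String) (out : Int × Int × Int) : Decidable (Spec_calculate_energy_and_cities names out) := by unfold Spec_calculate_energy_and_cities; infer_instance

-- ===== CLAIM (what is proved, stated in full; the proofs are below) =====
def Claim_equal_calculate_energy_and_cities : Prop := ∀ (names : List String), Dom_calculate_energy_and_cities names → Spec_calculate_energy_and_cities names (calculate_energy_and_cities names)

-- ===== LEMMAS AND PROOFS =====

-- ===== VERDICT (by name: the statement is the Claim_ definition above) =====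
-- Loop invariant over the list of lengths: A's fold from any start state equals that
-- state shifted by B's aggregates.
theorem fold_shift (ls : List Int) (t e o : Int) :
    ls.foldl
      (fun st l =>
        if l % 2 == 0 then (st.1 + l * 2, st.2.1 + 1, st.2.2)
        else (st.1 + l * 3, st.2.1, st.2.2 + 1))
      (t, e, o)
    = (t + (2 * (ls.filter (fun l => l % 2 == 0)).sum + 3 * (ls.filter (fun l => l % 2 != 0)).sum),
       e + ((ls.filter (fun l => l % 2 == 0)).length : Int),
       o + ((ls.filter (fun l => l % 2 != 0)).length : Int)) := by
  induction ls generalizing t e o with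
  | nil => simp
  | cons l ls ih =>
    simp only [List.foldl_cons, List.filter_cons]
    cases hl : (l % 2 == 0) with
    | true =>
      have h2 : (l % 2 != 0) = false := by simp [bne, hl]
      simp only [hl, h2, Bool.false_eq_true, reduceIte, ih,
        List.sum_cons, List.length_cons, Prod.ext_iff]
      refine ⟨by ring, by push_cast; ring, trivial⟩
    | false =>
      have h2 : (l % 2 != 0) = true := by simp [bne, hl]
      simp only [hl, h2, Bool.false_eq_true, reduceIte, ih,
        List.sum_cons, List.length_cons, Prod.ext_iff]
      refine ⟨by ring, trivial, by push_cast; ring⟩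

theorem calculate_energy_and_cities_spec : Claim_equal_calculate_energy_and_cities := by
  intro names _
  unfold Spec_calculate_energy_and_cities calculate_energy_and_cities
    calculate_energy_and_cities_alt
  rw [show (names.foldl
      (fun st city_name =>
        let (total_energy, even_cities, odd_cities) := st
        let length : Int := PySem.Str.len city_name
        if length % 2 == 0 then
          (total_energy + length * 2, even_cities + 1, odd_cities)
        else
          (total_energy + length * 3, even_cities, odd_cities + 1))
      ((0 : Int), (0 : Int), (0 : Int)))
    = ((names.map (fun name => PySem.Str.len name)).foldl
      (fun st l =>
        if l % 2 == 0 then (st.1 + l * 2, st.2.1 + 1, st.2.2)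
        else (st.1 + l * 3, st.2.1, st.2.2 + 1))
      ((0 : Int), (0 : Int), (0 : Int)))
    from by rw [List.foldl_map]]
  rw [fold_shift]
  simp
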